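-- pv_equiv track=rewrite | github.com/Quentin-Desmettre/GomokuAi | win_condition.py | is_column_win
-- ===== SOURCE A (Python) =====
-- def get_player_points(cell, row_1, row_2):
--     if cell == 1:
--         return (row_1 + 1, 0)
--     elif cell == -1:
--         return (0, row_2 + 1)
--     else:
--         return (0, 0)
--
-- def player_win(row_1, row_2):
--     if row_1 >= 5:
--         return 1
--     elif row_2 >= 5:
--         return -1
--     else:
--         return 0
--
-- def is_column_win(grid, column):
--     row_1 = 0
--     row_2 = 0
--     l = len(grid)
--     for i in range(l):
--         (row_1, row_2) = get_player_points(grid[i][column], row_1, row_2)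
--         if row_1 >= 5 or row_2 >= 5:
--             break
--     return player_win(row_1, row_2)
-- ===== SOURCE B (Python) =====
-- def is_column_win(grid, column):
--     col = [row[column] for row in grid]
--     for i in range(len(col) - 4):
--         v = col[i]
--         if v in (1, -1) and col[i:i + 5] == [v] * 5:
--             return v
--     return 0
-- ===== Notes on version B (the rewrite author's own statement) =====
-- stated objective: alternative
-- what changed: Replaces the run-counter state machine (two counters updated per cell, early break) with a materialised column scanned by a sliding 5-cell window slice comparison.
-- outside the precondition, e.g. on is_column_win([[1], [1], [1], [1], [1], []], 0): A returns 1, B raises IndexError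
import Mathlib
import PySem

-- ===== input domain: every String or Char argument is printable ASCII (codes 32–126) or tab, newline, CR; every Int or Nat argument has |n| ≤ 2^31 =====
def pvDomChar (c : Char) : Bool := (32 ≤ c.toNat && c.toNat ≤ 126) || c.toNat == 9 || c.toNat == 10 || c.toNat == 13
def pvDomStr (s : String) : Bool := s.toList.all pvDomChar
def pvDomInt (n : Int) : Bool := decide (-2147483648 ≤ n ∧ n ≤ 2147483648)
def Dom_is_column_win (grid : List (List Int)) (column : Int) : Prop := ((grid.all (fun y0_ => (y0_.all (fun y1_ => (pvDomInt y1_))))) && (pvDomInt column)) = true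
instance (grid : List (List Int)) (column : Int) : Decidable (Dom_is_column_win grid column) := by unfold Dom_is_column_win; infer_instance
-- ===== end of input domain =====

-- B replaces A's two-run-counter state machine with a materialised column scanned by a
-- sliding 5-cell window (slice comparison); alternative structure, same O(n) cost.
-- Equivalence is about return values on Pre_ (every row has the indexed column).

-- ===== PORT A =====
def get_player_points (cell row_1 row_2 : Int) : Int × Int :=
  if cell = 1 then (row_1 + 1, 0)
  else if cell = -1 then (0, row_2 + 1)
  else (0, 0)

def player_win (row_1 row_2 : Int) : Int :=
  if 5 ≤ row_1 then 1 else if 5 ≤ row_2 then -1 else 0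

-- the `for i in range(l)` loop with its early `break`; grid[i][column] is pyGet?
-- (Pre_ guarantees `some`; the .getD 0 default is never reached inside Pre_)
def icwLoop (column : Int) : List (List Int) → Int × Int → Int × Int
  | [], s => s
  | row :: rest, (r1, r2) =>
    let s := get_player_points ((PySem.List.pyGet? row column).getD 0) r1 r2
    if 5 ≤ s.1 ∨ 5 ≤ s.2 then s else icwLoop column rest s

def is_column_win (grid : List (List Int)) (column : Int) : Int :=
  let s := icwLoop column grid (0, 0)
  player_win s.1 s.2

-- ===== PORT B =====
-- the window loop of Source B: at each position compare col[i:i+5] with [v]*5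
-- (windows with fewer than 5 cells fail the slice equality, exactly as in Python)
def altScan : List Int → Int
  | [] => 0
  | v :: rest =>
    if (v = 1 ∨ v = -1) ∧ (v :: rest).take 5 = List.replicate 5 v then v
    else altScan rest

def is_column_win_alt (grid : List (List Int)) (column : Int) : Int :=
  altScan (grid.map (fun row => (PySem.List.pyGet? row column).getD 0))

-- ===== PRECONDITION & SPEC =====
-- Pre_ excludes grids with a row that lacks index `column` (Python A raises IndexError there,
-- unless a win completes earlier — see claim cites; B raises on any such grid).
def Pre_is_column_win (grid : List (List Int)) (column : Int) : Prop :=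
  ∀ row ∈ grid, PySem.Raise.InRange row.length column
instance (grid : List (List Int)) (column : Int) : Decidable (Pre_is_column_win grid column) := by unfold Pre_is_column_win; infer_instance

def pvWitness_is_column_win : List (List Int) × Int := ([[1, 0], [1, 0], [0, -1]], 1)

def Spec_is_column_win (grid : List (List Int)) (column : Int) (out : Int) : Prop := out = is_column_win_alt grid column
instance (grid : List (List Int)) (column : Int) (out : Int) : Decidable (Spec_is_column_win grid column out) := by unfold Spec_is_column_win; infer_instance

-- ===== CLAIM (what is proved, stated in full; the proofs are below) =====
def Claim_equal_is_column_win : Prop := ∀ (grid : List (List Int)) (column : Int), Dom_is_column_win grid column → Pre_is_column_win grid column → Spec_is_column_win grid column (is_column_win grid column)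

-- ===== LEMMAS AND PROOFS =====

-- a short run alone never wins
lemma altScan_replicate (k : Nat) (a : Int) (hk : k ≤ 4) :
    altScan (List.replicate k a) = 0 := by
  induction k with
  | zero => simp [altScan]
  | succ n ih =>
    rw [List.replicate_succ, altScan]
    have hlen : (List.replicate (n + 1) a).take 5 ≠ List.replicate 5 a := by
      intro h
      have := congrArg List.length h
      simp at this
      omega
    rw [List.replicate_succ] at hlen
    simp only [hlen, and_false, if_false]
    exact ih (by omega)

-- a window starting inside a short run of `a` followed by `b ≠ a` fails
lemma altScan_skip (k : Nat) (a b : Int) (l : List Int) (hk : k ≤ 4) (hab : a ≠ b) :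
    altScan (List.replicate k a ++ b :: l) = altScan (b :: l) := by
  induction k with
  | zero => simp
  | succ n ih =>
    rw [List.replicate_succ, List.cons_append, altScan]
    have hwin : (a :: (List.replicate n a ++ b :: l)).take 5 ≠ List.replicate 5 a := by
      intro h
      have h1 : (a :: (List.replicate n a ++ b :: l))[n + 1]? = some b := by
        simp
      have h2 : ((a :: (List.replicate n a ++ b :: l)).take 5)[n + 1]? = some b := by
        rw [List.getElem?_take_of_lt (by omega)]; exact h1
      rw [h] at h2
      rw [List.getElem?_replicate] at h2
      simp only [if_pos (by omega : n + 1 < 5)] at h2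
      exact hab (Option.some.inj h2)
    simp only [hwin, and_false, if_false]
    exact ih (by omega)

-- main invariant: the loop state (r1, r2) is a pending run, represented on the
-- window side as a replicate prefix in front of the remaining cells
lemma icw_invariant (grid : List (List Int)) (column : Int) :
    ∀ (r1 r2 : Int), 0 ≤ r1 → r1 ≤ 4 → 0 ≤ r2 → r2 ≤ 4 → (r1 = 0 ∨ r2 = 0) →
    player_win (icwLoop column grid (r1, r2)).1 (icwLoop column grid (r1, r2)).2
      = altScan (List.replicate r1.toNat 1 ++ List.replicate r2.toNat (-1) ++
          grid.map (fun row => (PySem.List.pyGet? row column).getD 0)) := by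
  induction grid with
  | nil =>
    intro r1 r2 h1 h1' h2 h2' h0
    have hw : player_win r1 r2 = 0 := by unfold player_win; split_ifs <;> omega
    rcases h0 with h0 | h0
    · subst h0
      simp only [icwLoop, hw, List.map_nil, List.append_nil, Int.toNat_zero,
        List.replicate_zero, List.nil_append]
      rw [altScan_replicate r2.toNat (-1) (by omega)]
    · subst h0
      simp only [icwLoop, hw, List.map_nil, List.append_nil, Int.toNat_zero,
        List.replicate_zero, List.append_nil]
      rw [altScan_replicate r1.toNat 1 (by omega)]
  | cons row rest ih =>
    intro r1 r2 h1 h1' h2 h2' h0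
    set c : Int := (PySem.List.pyGet? row column).getD 0 with hc
    rw [List.map_cons, ← hc]
    by_cases hc1 : c = 1
    · -- cell = 1 : state becomes (r1+1, 0)
      have hgpp : get_player_points c r1 r2 = (r1 + 1, 0) := by
        simp [get_player_points, hc1]
      by_cases hr14 : r1 = 4
      · -- break with a win for player 1
        have hbrk : icwLoop column (row :: rest) (r1, r2) = (r1 + 1, 0) := by
          rw [icwLoop, ← hc, hgpp]; simp; omega
        have hr2 : r2 = 0 := h0.resolve_left (by omega)
        subst hr14; subst hr2
        rw [hbrk, hc1]
        have hpre : (List.replicate (4 : Int).toNat 1 ++ List.replicate (0 : Int).toNat (-1 : Int) ++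
            (1 : Int) :: rest.map (fun row => (PySem.List.pyGet? row column).getD 0))
            = 1 :: 1 :: 1 :: 1 :: 1 :: rest.map (fun row => (PySem.List.pyGet? row column).getD 0) := by
          simp [List.replicate]
        rw [hpre, altScan, if_pos ⟨Or.inl rfl, rfl⟩]
        decide
      · -- no win yet: recurse with (r1+1, 0)
        have hstep : icwLoop column (row :: rest) (r1, r2) = icwLoop column rest (r1 + 1, 0) := by
          rw [icwLoop, ← hc, hgpp]; simp; omega
        rw [hstep, ih (r1 + 1) 0 (by omega) (by omega) (by omega) (by omega) (Or.inr rfl), hc1]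
        rcases h0 with hr1 | hr2
        · -- r1 = 0, possibly a pending (-1)-run to skip
          subst hr1
          simp only [Int.toNat_zero, List.replicate_zero, List.nil_append, List.append_nil]
          rw [altScan_skip r2.toNat (-1) 1 _ (by omega) (by decide)]
          norm_num
        · -- r2 = 0: extend the 1-run
          subst hr2
          have h5 : (r1 + 1).toNat = r1.toNat + 1 := by omega
          simp only [Int.toNat_zero, List.replicate_zero, List.nil_append,
            h5, List.replicate_succ', List.append_assoc, List.cons_append, List.nil_append]
    · by_cases hcm1 : c = -1
      · -- cell = -1 : state becomes (0, r2+1)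
        have hgpp : get_player_points c r1 r2 = (0, r2 + 1) := by
          simp [get_player_points, hcm1]
        by_cases hr24 : r2 = 4
        · have hbrk : icwLoop column (row :: rest) (r1, r2) = (0, r2 + 1) := by
            rw [icwLoop, ← hc, hgpp]; simp; omega
          have hr1 : r1 = 0 := h0.resolve_right (by omega)
          subst hr24; subst hr1
          rw [hbrk, hcm1]
          have hpre : (List.replicate (0 : Int).toNat 1 ++ List.replicate (4 : Int).toNat (-1 : Int) ++
              (-1 : Int) :: rest.map (fun row => (PySem.List.pyGet? row column).getD 0))
              = -1 :: -1 :: -1 :: -1 :: -1 :: rest.map (fun row => (PySem.List.pyGet? row column).getD 0) := by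
            simp [List.replicate]
          rw [hpre, altScan, if_pos ⟨Or.inr rfl, rfl⟩]
          decide
        · have hstep : icwLoop column (row :: rest) (r1, r2) = icwLoop column rest (0, r2 + 1) := by
            rw [icwLoop, ← hc, hgpp]; simp; omega
          rw [hstep, ih 0 (r2 + 1) (by omega) (by omega) (by omega) (by omega) (Or.inl rfl), hcm1]
          rcases h0 with hr1 | hr2
          · subst hr1
            have h5 : (r2 + 1).toNat = r2.toNat + 1 := by omega
            simp only [Int.toNat_zero, List.replicate_zero, List.nil_append,
              h5, List.replicate_succ', List.append_assoc, List.cons_append, List.nil_append]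
          · subst hr2
            simp only [Int.toNat_zero, List.replicate_zero, List.nil_append, List.append_nil]
            rw [altScan_skip r1.toNat 1 (-1) _ (by omega) (by decide)]
            norm_num
      · -- other cell: both runs reset
        have hgpp : get_player_points c r1 r2 = (0, 0) := by
          simp [get_player_points, hc1, hcm1]
        have hstep : icwLoop column (row :: rest) (r1, r2) = icwLoop column rest (0, 0) := by
          rw [icwLoop, ← hc, hgpp]; simp
        rw [hstep, ih 0 0 le_rfl (by omega) le_rfl (by omega) (Or.inl rfl)]
        have hcw : altScan (c :: rest.map (fun row => (PySem.List.pyGet? row column).getD 0))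
            = altScan (rest.map (fun row => (PySem.List.pyGet? row column).getD 0)) := by
          rw [altScan]
          simp only [hc1, hcm1, false_or, false_and, if_false]
        rcases h0 with hr1 | hr2
        · subst hr1
          simp only [Int.toNat_zero, List.replicate_zero, List.nil_append]
          rw [altScan_skip r2.toNat (-1) c _ (by omega) (fun h => hcm1 h.symm), hcw]
        · subst hr2
          simp only [Int.toNat_zero, List.replicate_zero, List.nil_append,
            List.append_nil]
          rw [altScan_skip r1.toNat 1 c _ (by omega) (fun h => hc1 h.symm), hcw]

-- ===== VERDICT (by name: the statement is the Claim_ definition above) =====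
theorem is_column_win_spec : Claim_equal_is_column_win := by
  intro grid column _ _
  unfold Spec_is_column_win is_column_win is_column_win_alt
  have := icw_invariant grid column 0 0 le_rfl (by omega) le_rfl (by omega) (Or.inl rfl)
  simpa [player_win] using this
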